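-- pv_equiv track=rewrite | github.com/dadadance/algos | smallest_difference.py | smallestDifference_00
-- ===== SOURCE A (Python) =====
-- def smallestDifference_00(arrayOne, arrayTwo):
--     arrayOne.sort()
--     arrayTwo.sort()
--     diff = max(max(arrayOne), max(arrayTwo))
--     list_ = []
--     for i in arrayOne:
--         for j in arrayTwo:
--             diff_tmp = abs(i - j)
--             if diff_tmp < diff:
--                 diff = abs(i - j)
--                 list_.append([i, j])
--     return list_[-1]  # diff
-- ===== SOURCE B (Python) =====
-- def smallestDifference_00(arrayOne, arrayTwo):
--     # Sort both, then a single two-pointer sweep: O(n log n + m log m) instead of O(n*m).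
--     arrayOne.sort()
--     arrayTwo.sort()
--     i = j = 0
--     best = None
--     best_diff = None
--     while i < len(arrayOne) and j < len(arrayTwo):
--         x, y = arrayOne[i], arrayTwo[j]
--         d = abs(x - y)
--         if best_diff is None or d < best_diff:
--             best_diff = d
--             best = [x, y]
--         if x < y:
--             i += 1
--         else:
--             j += 1
--     return best
-- ===== Notes on version B (the rewrite author's own statement) =====
-- stated objective: faster
-- what changed: Replaces A's nested O(n*m) scan over all pairs (seeded with max(max(a),max(b))) by a single two-pointer sweep over the two sorted arrays that tracks the first pair attaining the minimal difference.
-- outside the precondition, e.g. on smallestDifference_00([0], [0]): A raises IndexError, B returns [0, 0]; on smallestDifference_00([], [1]): A raises ValueError, B returns None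
import Mathlib
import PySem

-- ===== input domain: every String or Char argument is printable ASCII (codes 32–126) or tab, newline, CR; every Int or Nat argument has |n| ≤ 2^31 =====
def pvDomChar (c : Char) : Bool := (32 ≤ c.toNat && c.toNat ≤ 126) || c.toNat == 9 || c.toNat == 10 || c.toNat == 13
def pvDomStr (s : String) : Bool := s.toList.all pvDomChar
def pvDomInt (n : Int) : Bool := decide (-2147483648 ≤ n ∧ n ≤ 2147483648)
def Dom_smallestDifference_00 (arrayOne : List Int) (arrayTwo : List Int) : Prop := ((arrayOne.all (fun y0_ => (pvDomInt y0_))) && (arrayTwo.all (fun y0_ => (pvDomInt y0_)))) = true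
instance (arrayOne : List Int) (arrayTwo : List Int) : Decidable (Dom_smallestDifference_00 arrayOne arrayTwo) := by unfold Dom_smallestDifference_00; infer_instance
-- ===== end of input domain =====

-- B replaces A's nested scan over all pairs by a two-pointer sweep over the two sorted lists (objective: faster).
-- Both A and B sort their list arguments IN PLACE in Python; the equivalence proved here is about the return value.

-- ===== PORT A =====
def smallestDifference_00 (arrayOne : List Int) (arrayTwo : List Int) : List Int :=
  let a := PySem.List.sorted arrayOne (fun z => z) false
  let b := PySem.List.sorted arrayTwo (fun z => z) false
  -- max(xs) of a nonempty list; the empty case (Python ValueError) is excluded by Pre_ (getD 0 is never reached there)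
  let diff := max ((PySem.List.max? a (fun z => z)).getD 0) ((PySem.List.max? b (fun z => z)).getD 0)
  let st := a.foldl (fun st i =>
    b.foldl (fun st j =>
      if |i - j| < st.1 then (|i - j|, st.2 ++ [[i, j]]) else st) st) (diff, ([] : List (List Int)))
  -- list_[-1]; the empty case (Python IndexError) is excluded by Pre_ (getD [] is never reached there)
  (PySem.List.pyGet? st.2 (-1)).getD []

-- ===== PORT B =====
-- the while-loop of Source B: walk both sorted lists with two pointers, carrying (best_diff, best) (None at the start)
def sdLoop : List Int → List Int → Option (Int × List Int) → Option (Int × List Int)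
  | x :: xs, y :: ys, best =>
    let d := |x - y|
    let best' := match best with
      | none => some (d, [x, y])
      | some (bd, bp) => if d < bd then some (d, [x, y]) else some (bd, bp)
    if x < y then sdLoop xs (y :: ys) best' else sdLoop (x :: xs) ys best'
  | _, _, best => best
termination_by xs ys _ => xs.length + ys.length
decreasing_by all_goals (simp; try omega)

def smallestDifference_00_alt (arrayOne : List Int) (arrayTwo : List Int) : List Int :=
  let a := PySem.List.sorted arrayOne (fun z => z) false
  let b := PySem.List.sorted arrayTwo (fun z => z) false
  -- Source B returns None when the loop never ran; excluded by Pre_ (getD [] is never reached there)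
  ((sdLoop a b none).map Prod.snd).getD []

-- ===== PRECONDITION & SPEC =====
-- Pre_ requires some pair whose absolute difference lies strictly below some input element
-- (equivalently below max(max(arrayOne),max(arrayTwo))): otherwise A's list_ stays empty and
-- list_[-1] raises IndexError (and on an empty list max() raises ValueError).
def Pre_smallestDifference_00 (arrayOne : List Int) (arrayTwo : List Int) : Prop :=
  ∃ x ∈ arrayOne, ∃ y ∈ arrayTwo, ∃ z ∈ arrayOne ++ arrayTwo, |x - y| < z
instance (arrayOne : List Int) (arrayTwo : List Int) : Decidable (Pre_smallestDifference_00 arrayOne arrayTwo) := by unfold Pre_smallestDifference_00; infer_instance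
def pvWitness_smallestDifference_00 : List Int × List Int := ([3, 1], [2, 9])

def Spec_smallestDifference_00 (arrayOne : List Int) (arrayTwo : List Int) (out : List Int) : Prop := out = smallestDifference_00_alt arrayOne arrayTwo
instance (arrayOne : List Int) (arrayTwo : List Int) (out : List Int) : Decidable (Spec_smallestDifference_00 arrayOne arrayTwo out) := by unfold Spec_smallestDifference_00; infer_instance

-- ===== CLAIM (what is proved, stated in full; the proofs are below) =====
def Claim_equal_smallestDifference_00 : Prop := ∀ (arrayOne : List Int) (arrayTwo : List Int), Dom_smallestDifference_00 arrayOne arrayTwo → Pre_smallestDifference_00 arrayOne arrayTwo → Spec_smallestDifference_00 arrayOne arrayTwo (smallestDifference_00 arrayOne arrayTwo)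

-- ===== LEMMAS AND PROOFS =====

-- the value A and B minimise over a pair
def vAbs (p : Int × Int) : Int := |p.1 - p.2|

-- the full pair list A scans, in A's (lexicographic) order
def prodL (xs ys : List Int) : List (Int × Int) := xs.flatMap (fun x => ys.map (fun y => (x, y)))

-- the pairs B's two-pointer sweep visits, in visit order
def visitedL : List Int → List Int → List (Int × Int)
  | x :: xs, y :: ys =>
    (x, y) :: (if x < y then visitedL xs (y :: ys) else visitedL (x :: xs) ys)
  | _, _ => []
termination_by xs ys => xs.length + ys.length
decreasing_by all_goals (simp; try omega)

-- A's inner-loop step over the running (diff, list_) state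
def stepA (st : Int × List (List Int)) (p : Int × Int) : Int × List (List Int) :=
  if vAbs p < st.1 then (vAbs p, st.2 ++ [[p.1, p.2]]) else st

-- B's strict-improvement update
def updB (best : Option (Int × List Int)) (p : Int × Int) : Option (Int × List Int) :=
  match best with
  | none => some (vAbs p, [p.1, p.2])
  | some (bd, bp) => if vAbs p < bd then some (vAbs p, [p.1, p.2]) else some (bd, bp)

theorem mem_prodL {p : Int × Int} {xs ys : List Int} :
    p ∈ prodL xs ys ↔ p.1 ∈ xs ∧ p.2 ∈ ys := by
  simp [prodL, List.mem_flatMap, List.mem_map]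
  constructor
  · rintro ⟨x, hx, y, hy, rfl⟩; exact ⟨hx, hy⟩
  · rintro ⟨h1, h2⟩; exact ⟨p.1, h1, p.2, h2, rfl⟩

theorem prodL_cons (x : Int) (xs ys : List Int) :
    prodL (x :: xs) ys = ys.map (fun y => (x, y)) ++ prodL xs ys := rfl

theorem prodL_nil (ys : List Int) : prodL [] ys = [] := rfl

theorem nested_foldl_eq (xs ys : List Int) (st : Int × List (List Int)) :
    xs.foldl (fun st x => ys.foldl (fun st y => stepA st (x, y)) st) st
      = (prodL xs ys).foldl stepA st := by
  induction xs generalizing st with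
  | nil => simp [prodL]
  | cons x xs ih =>
    simp only [List.foldl_cons, prodL, List.flatMap_cons, List.foldl_append, List.foldl_map]
    rw [ih]
    rfl

theorem foldl_stepA_no_improve (L : List (Int × Int)) (st : Int × List (List Int))
    (h : ∀ p ∈ L, st.1 ≤ vAbs p) : L.foldl stepA st = st := by
  induction L with
  | nil => rfl
  | cons q t ih =>
    have h1 := h q (List.mem_cons_self ..)
    simp only [List.foldl_cons, stepA, if_neg (not_lt.mpr h1)]
    exact ih (fun p hp => h p (List.mem_cons_of_mem _ hp))

theorem foldl_stepA_main (L : List (Int × Int)) (m : Int) (p0 : Int × Int)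
    (hmem : ∃ q ∈ L, vAbs q = m) (hlb : ∀ q ∈ L, m ≤ vAbs q)
    (hfind : L.find? (fun p => vAbs p == m) = some p0) :
    ∀ st : Int × List (List Int), m < st.1 →
      ((L.foldl stepA st).2).getLast? = some [p0.1, p0.2] := by
  induction L with
  | nil => simp at hmem
  | cons h t ih =>
    intro st hm
    by_cases hlt : vAbs h < st.1
    · simp only [List.foldl_cons, stepA, if_pos hlt]
      by_cases himp : ∃ q ∈ t, vAbs q < vAbs h
      · obtain ⟨q, hq, hq2⟩ := himp
        have hmlt : m < vAbs h := lt_of_le_of_lt (hlb q (List.mem_cons_of_mem _ hq)) hq2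
        have hne : (vAbs h == m) = false := by simp; omega
        rw [List.find?_cons, hne] at hfind
        have hmem' : ∃ q ∈ t, vAbs q = m := by
          obtain ⟨q0, hq0, hq0e⟩ := hmem
          rcases List.mem_cons.mp hq0 with rfl | hmem'
          · omega
          · exact ⟨q0, hmem', hq0e⟩
        exact ih hmem' (fun p hp => hlb p (List.mem_cons_of_mem _ hp)) hfind _ hmlt
      · have himp' : ∀ q ∈ t, vAbs h ≤ vAbs q := fun q hq => le_of_not_gt fun hc => himp ⟨q, hq, hc⟩
        have heq : vAbs h = m := by
          have h1 := hlb h (List.mem_cons_self ..)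
          obtain ⟨q0, hq0, hq0e⟩ := hmem
          rcases List.mem_cons.mp hq0 with rfl | hmem'
          · omega
          · have := himp' q0 hmem'; omega
        have hb : (vAbs h == m) = true := by simp [heq]
        rw [List.find?_cons, hb] at hfind
        obtain rfl : h = p0 := by simpa using hfind
        rw [foldl_stepA_no_improve t _ (fun p hp => heq ▸ himp' p hp)]
        simp
    · simp only [List.foldl_cons, stepA, if_neg hlt]
      have hne : (vAbs h == m) = false := by simp; omega
      rw [List.find?_cons, hne] at hfind
      have hmem' : ∃ q ∈ t, vAbs q = m := by
        obtain ⟨q0, hq0, hq0e⟩ := hmem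
        rcases List.mem_cons.mp hq0 with rfl | hmem'
        · omega
        · exact ⟨q0, hmem', hq0e⟩
      exact ih hmem' (fun p hp => hlb p (List.mem_cons_of_mem _ hp)) hfind st hm

theorem foldl_updB_no_improve (L : List (Int × Int)) (bd : Int) (bp : List Int)
    (h : ∀ p ∈ L, bd ≤ vAbs p) : L.foldl updB (some (bd, bp)) = some (bd, bp) := by
  induction L with
  | nil => rfl
  | cons q t ih =>
    have h1 := h q (List.mem_cons_self ..)
    simp only [List.foldl_cons, updB, if_neg (not_lt.mpr h1)]
    exact ih (fun p hp => h p (List.mem_cons_of_mem _ hp))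

theorem foldl_updB_some (L : List (Int × Int)) (m : Int) (p0 : Int × Int)
    (hmem : ∃ q ∈ L, vAbs q = m) (hlb : ∀ q ∈ L, m ≤ vAbs q)
    (hfind : L.find? (fun p => vAbs p == m) = some p0) :
    ∀ (bd : Int) (bp : List Int), m < bd →
      L.foldl updB (some (bd, bp)) = some (m, [p0.1, p0.2]) := by
  induction L with
  | nil => simp at hmem
  | cons h t ih =>
    intro bd bp hm
    by_cases hlt : vAbs h < bd
    · simp only [List.foldl_cons, updB, if_pos hlt]
      by_cases himp : ∃ q ∈ t, vAbs q < vAbs h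
      · obtain ⟨q, hq, hq2⟩ := himp
        have hmlt : m < vAbs h := lt_of_le_of_lt (hlb q (List.mem_cons_of_mem _ hq)) hq2
        have hne : (vAbs h == m) = false := by simp; omega
        rw [List.find?_cons, hne] at hfind
        have hmem' : ∃ q ∈ t, vAbs q = m := by
          obtain ⟨q0, hq0, hq0e⟩ := hmem
          rcases List.mem_cons.mp hq0 with rfl | hmem'
          · omega
          · exact ⟨q0, hmem', hq0e⟩
        exact ih hmem' (fun p hp => hlb p (List.mem_cons_of_mem _ hp)) hfind _ _ hmlt
      · have himp' : ∀ q ∈ t, vAbs h ≤ vAbs q := fun q hq => le_of_not_gt fun hc => himp ⟨q, hq, hc⟩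
        have heq : vAbs h = m := by
          have h1 := hlb h (List.mem_cons_self ..)
          obtain ⟨q0, hq0, hq0e⟩ := hmem
          rcases List.mem_cons.mp hq0 with rfl | hmem'
          · omega
          · have := himp' q0 hmem'; omega
        have hb : (vAbs h == m) = true := by simp [heq]
        rw [List.find?_cons, hb] at hfind
        obtain rfl : h = p0 := by simpa using hfind
        rw [foldl_updB_no_improve t _ _ (fun p hp => heq ▸ himp' p hp)]
        rw [heq]
    · simp only [List.foldl_cons, updB, if_neg hlt]
      have hge : bd ≤ vAbs h := not_lt.mp hlt
      have hne : (vAbs h == m) = false := by simp; omega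
      rw [List.find?_cons, hne] at hfind
      have hmem' : ∃ q ∈ t, vAbs q = m := by
        obtain ⟨q0, hq0, hq0e⟩ := hmem
        rcases List.mem_cons.mp hq0 with rfl | hmem'
        · omega
        · exact ⟨q0, hmem', hq0e⟩
      exact ih hmem' (fun p hp => hlb p (List.mem_cons_of_mem _ hp)) hfind bd bp hm

theorem foldl_updB_none (L : List (Int × Int)) (m : Int) (p0 : Int × Int)
    (hmem : ∃ q ∈ L, vAbs q = m) (hlb : ∀ q ∈ L, m ≤ vAbs q)
    (hfind : L.find? (fun p => vAbs p == m) = some p0) :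
    L.foldl updB none = some (m, [p0.1, p0.2]) := by
  rcases L with _ | ⟨h, t⟩
  · simp at hmem
  · simp only [List.foldl_cons, updB]
    by_cases himp : ∃ q ∈ t, vAbs q < vAbs h
    · obtain ⟨q, hq, hq2⟩ := himp
      have hmlt : m < vAbs h := lt_of_le_of_lt (hlb q (List.mem_cons_of_mem _ hq)) hq2
      have hne : (vAbs h == m) = false := by simp; omega
      rw [List.find?_cons, hne] at hfind
      have hmem' : ∃ q ∈ t, vAbs q = m := by
        obtain ⟨q0, hq0, hq0e⟩ := hmem
        rcases List.mem_cons.mp hq0 with rfl | hmem'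
        · omega
        · exact ⟨q0, hmem', hq0e⟩
      exact foldl_updB_some t m p0 hmem' (fun p hp => hlb p (List.mem_cons_of_mem _ hp)) hfind _ _ hmlt
    · have himp' : ∀ q ∈ t, vAbs h ≤ vAbs q := fun q hq => le_of_not_gt fun hc => himp ⟨q, hq, hc⟩
      have heq : vAbs h = m := by
        have h1 := hlb h (List.mem_cons_self ..)
        obtain ⟨q0, hq0, hq0e⟩ := hmem
        rcases List.mem_cons.mp hq0 with rfl | hmem'
        · omega
        · have := himp' q0 hmem'; omega
      have hb : (vAbs h == m) = true := by simp [heq]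
      rw [List.find?_cons, hb] at hfind
      obtain rfl : h = p0 := by simpa using hfind
      rw [foldl_updB_no_improve t _ _ (fun p hp => heq ▸ himp' p hp)]
      rw [heq]

theorem sdLoop_cons (x : Int) (xs : List Int) (y : Int) (ys : List Int) (best : Option (Int × List Int)) :
    sdLoop (x :: xs) (y :: ys) best =
      if x < y then sdLoop xs (y :: ys) (updB best (x, y)) else sdLoop (x :: xs) ys (updB best (x, y)) := by
  conv_lhs => rw [sdLoop.eq_def]
  rcases best with _ | ⟨bd, bp⟩ <;> simp [updB, vAbs]

theorem visitedL_cons (x : Int) (xs : List Int) (y : Int) (ys : List Int) :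
    visitedL (x :: xs) (y :: ys) = (x, y) :: (if x < y then visitedL xs (y :: ys) else visitedL (x :: xs) ys) := by
  conv_lhs => rw [visitedL.eq_def]

theorem visitedL_nil_left (ys : List Int) : visitedL [] ys = [] := by
  rw [visitedL.eq_def]

theorem visitedL_nil_right (xs : List Int) : visitedL xs [] = [] := by
  rw [visitedL.eq_def]; rcases xs with _ | _ <;> rfl

theorem sdLoop_nil_left (ys : List Int) (best : Option (Int × List Int)) : sdLoop [] ys best = best := by
  rw [sdLoop.eq_def]

theorem sdLoop_nil_right (xs : List Int) (best : Option (Int × List Int)) : sdLoop xs [] best = best := by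
  rw [sdLoop.eq_def]; rcases xs with _ | _ <;> rfl

theorem sdLoop_eq_foldl (xs ys : List Int) (best : Option (Int × List Int)) :
    sdLoop xs ys best = (visitedL xs ys).foldl updB best := by
  induction xs, ys using visitedL.induct generalizing best with
  | case1 x xs y ys ih1 ih2 =>
    rw [sdLoop_cons, visitedL_cons, List.foldl_cons]
    by_cases h : x < y
    · rw [if_pos h, if_pos h, ih1]
    · rw [if_neg h, if_neg h, ih2]
  | case2 xs ys h =>
    rcases xs with _ | ⟨x, xs⟩ <;> rcases ys with _ | ⟨y, ys⟩
    · simp [sdLoop_nil_left, visitedL_nil_left]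
    · simp [sdLoop_nil_left, visitedL_nil_left]
    · simp [sdLoop_nil_right, visitedL_nil_right]
    · exact ((h x xs y ys rfl rfl)).elim

theorem mem_visitedL {q : Int × Int} {xs ys : List Int} (h : q ∈ visitedL xs ys) :
    q.1 ∈ xs ∧ q.2 ∈ ys := by
  induction xs, ys using visitedL.induct with
  | case1 x xs y ys ih1 ih2 =>
    rw [visitedL_cons] at h
    rcases List.mem_cons.mp h with rfl | h2
    · simp
    · by_cases hlt : x < y
      · rw [if_pos hlt] at h2
        obtain ⟨h3, h4⟩ := ih1 h2
        exact ⟨List.mem_cons_of_mem _ h3, h4⟩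
      · rw [if_neg hlt] at h2
        obtain ⟨h3, h4⟩ := ih2 h2
        exact ⟨h3, List.mem_cons_of_mem _ h4⟩
  | case2 xs ys hh =>
    rcases xs with _ | ⟨x, xs⟩ <;> rcases ys with _ | ⟨y, ys⟩
    · simp [visitedL_nil_left] at h
    · simp [visitedL_nil_left] at h
    · simp [visitedL_nil_right] at h
    · exact ((hh x xs y ys rfl rfl)).elim

-- KEY: on sorted lists, every pair of the full product is dominated by some visited pair
theorem visited_min (xs ys : List Int) (hxs : xs.Pairwise (· ≤ ·)) (hys : ys.Pairwise (· ≤ ·)) :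
    ∀ x ∈ xs, ∀ y ∈ ys, ∃ q ∈ visitedL xs ys, vAbs q ≤ |x - y| := by
  induction xs, ys using visitedL.induct with
  | case1 a xs b ys ih1 ih2 =>
    intro u hu w hw
    rw [visitedL_cons]
    by_cases hlt : a < b
    · rw [if_pos hlt]
      rcases List.mem_cons.mp hu with rfl | hu'
      · refine ⟨(u, b), List.mem_cons_self .., ?_⟩
        have hbw : b ≤ w := by
          rcases List.mem_cons.mp hw with rfl | hw'
          · omega
          · exact (List.pairwise_cons.mp hys).1 w hw'
        simp only [vAbs]
        rw [abs_of_neg (by omega), abs_of_neg (by omega)]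
        omega
      · obtain ⟨q, hq, hqe⟩ := ih1 (List.pairwise_cons.mp hxs).2 hys u hu' w hw
        exact ⟨q, List.mem_cons_of_mem _ hq, hqe⟩
    · rw [if_neg hlt]
      rcases List.mem_cons.mp hw with rfl | hw'
      · refine ⟨(a, w), List.mem_cons_self .., ?_⟩
        have hau : a ≤ u := by
          rcases List.mem_cons.mp hu with rfl | hu'
          · omega
          · exact (List.pairwise_cons.mp hxs).1 u hu'
        simp only [vAbs]
        rw [abs_of_nonneg (by omega), abs_of_nonneg (by omega)]
        omega
      · obtain ⟨q, hq, hqe⟩ := ih2 hxs (List.pairwise_cons.mp hys).2 u hu w hw'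
        exact ⟨q, List.mem_cons_of_mem _ hq, hqe⟩
  | case2 xs ys hh =>
    intro u hu w hw
    rcases xs with _ | ⟨a, xs⟩ <;> rcases ys with _ | ⟨b, ys⟩
    · simp at hu
    · simp at hu
    · simp at hw
    · exact ((hh (a) xs (b) ys rfl rfl)).elim

-- dropping a column y that nowhere attains m does not change the first m-pair
theorem find_drop_col (xs ys : List Int) (y : Int) (m : Int)
    (h : ∀ x ∈ xs, ¬ (vAbs (x, y) = m)) :
    (prodL xs (y :: ys)).find? (fun p => vAbs p == m)
      = (prodL xs ys).find? (fun p => vAbs p == m) := by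
  induction xs with
  | nil => rfl
  | cons x xs ih =>
    rw [prodL_cons, prodL_cons, List.map_cons, List.cons_append,
      List.find?_cons_of_neg (by simp; exact h x (List.mem_cons_self ..)),
      List.find?_append, List.find?_append, ih (fun x' hx' => h x' (List.mem_cons_of_mem _ hx'))]

-- KEY: the first minimal pair of the full product is the first minimal pair the sweep visits
theorem find_prod_eq_find_visited (m : Int) :
    ∀ xs ys : List Int, xs.Pairwise (· ≤ ·) → ys.Pairwise (· ≤ ·) →
    (∀ p ∈ prodL xs ys, m ≤ vAbs p) → (∃ p ∈ prodL xs ys, vAbs p = m) →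
    (prodL xs ys).find? (fun p => vAbs p == m)
      = (visitedL xs ys).find? (fun p => vAbs p == m) := by
  intro xs ys
  induction xs, ys using visitedL.induct with
  | case1 x xs y ys ih1 ih2 =>
    intro hxs hys hlb hex
    have hmemxy : (x, y) ∈ prodL (x :: xs) (y :: ys) := mem_prodL.mpr ⟨List.mem_cons_self .., List.mem_cons_self ..⟩
    rw [visitedL_cons, prodL_cons, List.map_cons, List.cons_append]
    by_cases hpred : vAbs (x, y) = m
    · rw [List.find?_cons_of_pos (by simp [hpred]), List.find?_cons_of_pos (by simp [hpred])]
    · have hgt : m < vAbs (x, y) := lt_of_le_of_ne (hlb _ hmemxy) (fun hc => hpred hc.symm)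
      rw [List.find?_cons_of_neg (by simp; exact hpred), List.find?_cons_of_neg (by simp; exact hpred)]
      by_cases hlt : x < y
      · rw [if_pos hlt]
        -- row (x, ·) over ys never attains m
        have hrow : ∀ y' ∈ ys, ¬ (vAbs (x, y') = m) := by
          intro y' hy' hc
          have hyy : y ≤ y' := (List.pairwise_cons.mp hys).1 y' hy'
          have e1 : vAbs (x, y') = y' - x := by
            show |x - y'| = y' - x
            rw [abs_of_neg (by omega)]; ring
          have e2 : vAbs (x, y) = y - x := by
            show |x - y| = y - x
            rw [abs_of_neg (by omega)]; ring
          omega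
        have hmap : (ys.map (fun y' => (x, y'))).find? (fun p => vAbs p == m) = none := by
          rw [List.find?_eq_none]
          intro p hp
          obtain ⟨y', hy', rfl⟩ := List.mem_map.mp hp
          simp only [beq_iff_eq]
          exact hrow y' hy'
        rw [List.find?_append, hmap, Option.none_or]
        -- the minimum is attained inside xs
        have hex' : ∃ p ∈ prodL xs (y :: ys), vAbs p = m := by
          obtain ⟨p, hp, hpe⟩ := hex
          obtain ⟨hp1, hp2⟩ := mem_prodL.mp hp
          rcases List.mem_cons.mp hp1 with h1 | h1
          · exfalso
            rcases List.mem_cons.mp hp2 with h2 | h2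
            · exact hpred (by rw [show ((x, y) : Int × Int) = p from Prod.ext_iff.mpr ⟨h1.symm, h2.symm⟩]; exact hpe)
            · exact hrow p.2 h2 (by rw [show ((x, p.2) : Int × Int) = p from Prod.ext_iff.mpr ⟨h1.symm, rfl⟩]; exact hpe)
          · exact ⟨p, mem_prodL.mpr ⟨h1, hp2⟩, hpe⟩
        refine ih1 ((List.pairwise_cons.mp hxs).2) hys ?_ hex'
        intro p hp
        obtain ⟨hp1, hp2⟩ := mem_prodL.mp hp
        exact hlb p (mem_prodL.mpr ⟨List.mem_cons_of_mem _ hp1, hp2⟩)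
      · rw [if_neg hlt]
        have hyx : y ≤ x := by omega
        -- column (·, y) over xs never attains m
        have hcol : ∀ x' ∈ xs, ¬ (vAbs (x', y) = m) := by
          intro x' hx' hc
          have hxx : x ≤ x' := (List.pairwise_cons.mp hxs).1 x' hx'
          have e1 : vAbs (x', y) = x' - y := by
            show |x' - y| = x' - y
            rw [abs_of_nonneg (by omega)]
          have e2 : vAbs (x, y) = x - y := by
            show |x - y| = x - y
            rw [abs_of_nonneg (by omega)]
          omega
        rw [List.find?_append, find_drop_col xs ys y m hcol, ← List.find?_append, ← prodL_cons]
        -- the minimum is attained inside ys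
        have hex' : ∃ p ∈ prodL (x :: xs) ys, vAbs p = m := by
          obtain ⟨p, hp, hpe⟩ := hex
          obtain ⟨hp1, hp2⟩ := mem_prodL.mp hp
          rcases List.mem_cons.mp hp2 with h2 | h2
          · exfalso
            rcases List.mem_cons.mp hp1 with h1 | h1
            · exact hpred (by rw [show ((x, y) : Int × Int) = p from Prod.ext_iff.mpr ⟨h1.symm, h2.symm⟩]; exact hpe)
            · exact hcol p.1 h1 (by rw [show ((p.1, y) : Int × Int) = p from Prod.ext_iff.mpr ⟨rfl, h2.symm⟩]; exact hpe)
          · exact ⟨p, mem_prodL.mpr ⟨hp1, h2⟩, hpe⟩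
        refine ih2 hxs ((List.pairwise_cons.mp hys).2) ?_ hex'
        intro p hp
        obtain ⟨hp1, hp2⟩ := mem_prodL.mp hp
        exact hlb p (mem_prodL.mpr ⟨hp1, List.mem_cons_of_mem _ hp2⟩)
  | case2 xs ys hh =>
    intro _ _ _ _
    rcases xs with _ | ⟨x, xs⟩ <;> rcases ys with _ | ⟨y, ys⟩
    · rw [prodL_nil, visitedL_nil_left]
    · rw [prodL_nil, visitedL_nil_left]
    · rw [visitedL_nil_right]
      have : prodL (x :: xs) [] = [] := by simp [prodL]
      rw [this]
    · exact ((hh x xs y ys rfl rfl)).elim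

theorem exists_min (L : List (Int × Int)) (hne : L ≠ []) :
    ∃ m, (∀ q ∈ L, m ≤ vAbs q) ∧ ∃ q ∈ L, vAbs q = m := by
  induction L with
  | nil => simp at hne
  | cons h t ih =>
    rcases t with _ | ⟨h2, t2⟩
    · exact ⟨vAbs h, by simp⟩
    · obtain ⟨m, hm1, q, hq, hqe⟩ := ih (by simp)
      by_cases hle : vAbs h ≤ m
      · refine ⟨vAbs h, ?_, h, List.mem_cons_self .., rfl⟩
        intro p hp
        rcases List.mem_cons.mp hp with rfl | hp
        · omega
        · have := hm1 p hp; omega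
      · refine ⟨m, ?_, q, List.mem_cons_of_mem _ hq, hqe⟩
        intro p hp
        rcases List.mem_cons.mp hp with rfl | hp
        · omega
        · exact hm1 p hp

-- ===== VERDICT (by name: the statement is the Claim_ definition above) =====
theorem portA_char (a1 a2 : List Int) :
    smallestDifference_00 a1 a2 =
      (PySem.List.pyGet? (((prodL (PySem.List.sorted a1 (fun z => z) false) (PySem.List.sorted a2 (fun z => z) false)).foldl stepA
        (max ((PySem.List.max? (PySem.List.sorted a1 (fun z => z) false) (fun z => z)).getD 0)
             ((PySem.List.max? (PySem.List.sorted a2 (fun z => z) false) (fun z => z)).getD 0),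
         ([] : List (List Int)))).2) (-1)).getD [] := by
  exact congrArg (fun l => (PySem.List.pyGet? l.2 (-1)).getD [])
    (nested_foldl_eq (PySem.List.sorted a1 (fun z => z) false) (PySem.List.sorted a2 (fun z => z) false) _)

theorem portB_char (a1 a2 : List Int) :
    smallestDifference_00_alt a1 a2 =
      (((visitedL (PySem.List.sorted a1 (fun z => z) false) (PySem.List.sorted a2 (fun z => z) false)).foldl updB none).map Prod.snd).getD [] := by
  exact congrArg (fun o => (Option.map Prod.snd o).getD [])
    (sdLoop_eq_foldl (PySem.List.sorted a1 (fun z => z) false) (PySem.List.sorted a2 (fun z => z) false) none)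

theorem smallestDifference_00_spec : Claim_equal_smallestDifference_00 := by
  intro a1 a2 _ hpre
  unfold Spec_smallestDifference_00
  obtain ⟨x0, hx0, y0, hy0, z0, hz0, hlt0⟩ := hpre
  -- the sorted lists
  have hx0' : x0 ∈ PySem.List.sorted a1 (fun z => z) false := (PySem.List.mem_sorted _ _ _ _).mpr hx0
  have hy0' : y0 ∈ PySem.List.sorted a2 (fun z => z) false := (PySem.List.mem_sorted _ _ _ _).mpr hy0
  have sA : (PySem.List.sorted a1 (fun z => z) false).Pairwise (· ≤ ·) := PySem.List.sorted_pairwise a1 (fun z => z)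
  have sB : (PySem.List.sorted a2 (fun z => z) false).Pairwise (· ≤ ·) := PySem.List.sorted_pairwise a2 (fun z => z)
  -- the minimum m over all pairs
  have hPmem : (x0, y0) ∈ prodL (PySem.List.sorted a1 (fun z => z) false) (PySem.List.sorted a2 (fun z => z) false) :=
    mem_prodL.mpr ⟨hx0', hy0'⟩
  obtain ⟨m, hlb, hmem⟩ := exists_min _ (List.ne_nil_of_mem hPmem)
  -- m lies strictly below A's initial diff = max(max a1, max a2)
  have hz0' : z0 ≤ max ((PySem.List.max? (PySem.List.sorted a1 (fun z => z) false) (fun z => z)).getD 0)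
      ((PySem.List.max? (PySem.List.sorted a2 (fun z => z) false) (fun z => z)).getD 0) := by
    rcases List.mem_append.mp hz0 with hz1 | hz2
    · have hz1' : z0 ∈ PySem.List.sorted a1 (fun z => z) false := (PySem.List.mem_sorted _ _ _ _).mpr hz1
      rcases hA : PySem.List.max? (PySem.List.sorted a1 (fun z => z) false) (fun z => z) with _ | mA
      · exact absurd ((PySem.List.max?_eq_none_iff _ _).mp hA) (List.ne_nil_of_mem hz1')
      · have := PySem.List.max?_isMax hA z0 hz1'
        simp only [Option.getD_some]
        exact le_max_of_le_left this
    · have hz2' : z0 ∈ PySem.List.sorted a2 (fun z => z) false := (PySem.List.mem_sorted _ _ _ _).mpr hz2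
      rcases hB : PySem.List.max? (PySem.List.sorted a2 (fun z => z) false) (fun z => z) with _ | mB
      · exact absurd ((PySem.List.max?_eq_none_iff _ _).mp hB) (List.ne_nil_of_mem hz2')
      · have := PySem.List.max?_isMax hB z0 hz2'
        simp only [Option.getD_some]
        exact le_max_of_le_right this
  have hmd : m < max ((PySem.List.max? (PySem.List.sorted a1 (fun z => z) false) (fun z => z)).getD 0)
      ((PySem.List.max? (PySem.List.sorted a2 (fun z => z) false) (fun z => z)).getD 0) :=
    lt_of_lt_of_le (lt_of_le_of_lt (hlb _ hPmem) hlt0) hz0'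
  -- the first pair attaining m in A's scan order
  rcases hfp : (prodL (PySem.List.sorted a1 (fun z => z) false) (PySem.List.sorted a2 (fun z => z) false)).find? (fun p => vAbs p == m) with _ | p0
  · exfalso
    obtain ⟨q, hq, hqe⟩ := hmem
    exact absurd (by simp [hqe] : ((fun p => vAbs p == m) q) = true) (by simp [List.find?_eq_none.mp hfp q hq])
  -- A returns it
  have hAval : smallestDifference_00 a1 a2 = [p0.1, p0.2] := by
    rw [portA_char, PySem.List.pyGet?_neg_one,
      foldl_stepA_main _ m p0 hmem hlb hfp _ hmd]
    rfl
  -- B returns it too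
  have hlbV : ∀ q ∈ visitedL (PySem.List.sorted a1 (fun z => z) false) (PySem.List.sorted a2 (fun z => z) false), m ≤ vAbs q :=
    fun q hq => hlb q (mem_prodL.mpr (mem_visitedL hq))
  have hmemV : ∃ q ∈ visitedL (PySem.List.sorted a1 (fun z => z) false) (PySem.List.sorted a2 (fun z => z) false), vAbs q = m := by
    obtain ⟨q, hqP, hqe⟩ := hmem
    obtain ⟨hq1, hq2⟩ := mem_prodL.mp hqP
    obtain ⟨q', hq', hle⟩ := visited_min _ _ sA sB q.1 hq1 q.2 hq2
    exact ⟨q', hq', le_antisymm (le_of_le_of_eq hle hqe) (hlbV q' hq')⟩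
  have hfindV : (visitedL (PySem.List.sorted a1 (fun z => z) false) (PySem.List.sorted a2 (fun z => z) false)).find? (fun p => vAbs p == m) = some p0 := by
    rw [← find_prod_eq_find_visited m _ _ sA sB hlb hmem, hfp]
  have hBval : smallestDifference_00_alt a1 a2 = [p0.1, p0.2] := by
    rw [portB_char, foldl_updB_none _ m p0 hmemV hlbV hfindV]
    rfl
  rw [hAval, hBval]
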